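-- pv_equiv track=rewrite | github.com/rossi-jeff/python-games-fastapi | utilities/ten_grand.py | ScoreSixKind
-- ===== SOURCE A (Python) =====
-- from typing import List
--
-- def MapDieFaces(dice: List[int]):
--     dieMap = {}
--     for d in dice:
--         if not d in dieMap:
--             dieMap[d] = 0
--         dieMap[d] = dieMap[d] + 1
--     keys: List[int] = []
--     for k in dieMap.keys():
--         keys.append(k)
--     values: List[int] = []
--     for v in dieMap.values():
--         values.append(v)
--     return dieMap, keys, values
--
-- def ScoreSixKind(dice: List[int]):
--     score = 0
--     dieMap, keys, _ = MapDieFaces(dice)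
--     for k in keys:
--         if dieMap[k] == 6:
--             if k == 1:
--                 score = score + 8000
--             else:
--                 score = score + (k * 800)
--     return score
-- ===== SOURCE B (Python) =====
-- def ScoreSixKind(dice):
--     s = sorted(dice)
--     score = 0
--     i = 0
--     n = len(s)
--     while i < n:
--         j = i
--         while j < n and s[j] == s[i]:
--             j += 1
--         if j - i == 6:
--             score += 8000 if s[i] == 1 else s[i] * 800
--         i = j
--     return score
-- ===== Notes on version B (the rewrite author's own statement) =====
-- stated objective: alternative
-- what changed: Replaces the dict-of-counts plus key-list traversal with sort-then-scan: sort a copy of the dice and walk runs of equal consecutive values, adding the six-of-a-kind bonus when a run has length 6; summation is order-independent so the result is identical.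
import Mathlib
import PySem

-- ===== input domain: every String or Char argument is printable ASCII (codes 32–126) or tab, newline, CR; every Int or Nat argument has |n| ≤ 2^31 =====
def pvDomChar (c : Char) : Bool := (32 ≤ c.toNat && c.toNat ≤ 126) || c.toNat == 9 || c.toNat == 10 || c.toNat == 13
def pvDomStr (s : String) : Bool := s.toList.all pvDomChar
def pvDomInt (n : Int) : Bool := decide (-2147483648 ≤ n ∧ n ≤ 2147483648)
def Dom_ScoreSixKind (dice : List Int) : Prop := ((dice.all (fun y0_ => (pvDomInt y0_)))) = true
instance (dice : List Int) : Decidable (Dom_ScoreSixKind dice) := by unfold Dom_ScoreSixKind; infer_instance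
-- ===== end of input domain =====

-- B replaces A's dict-of-counts + key-list traversal by sort-then-scan over runs of equal
-- consecutive values (alternative decomposition; same result since the sum is order-independent).

-- ===== PORT A =====
def MapDieFaces (dice : List Int) :
    PySem.Dict Int Int × List Int × List Int :=
  let dieMap := dice.foldl (fun d x =>
    let d := if d.contains x then d else d.insert x 0
    d.insert x (d.getD x 0 + 1)) PySem.Dict.empty
  let keys := dieMap.keys.foldl (fun acc k => acc ++ [k]) ([] : List Int)
  let values := dieMap.values.foldl (fun acc v => acc ++ [v]) ([] : List Int)
  (dieMap, keys, values)

def ScoreSixKind (dice : List Int) : Int :=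
  let r := MapDieFaces dice
  let dieMap := r.1
  let keys := r.2.1
  -- 'dieMap[k]' is ported as 'getD k 0': every k in keys is a key of dieMap, so no KeyError
  keys.foldl (fun score k =>
    if dieMap.getD k 0 == 6 then
      (if k == 1 then score + 8000 else score + k * 800)
    else score) 0

-- ===== PORT B =====
-- the outer while loop of Source B: consume one run of equal consecutive values per step
def grpRuns (l : List Int) : Int :=
  match l with
  | [] => 0
  | x :: xs =>
    let run := (x :: xs).takeWhile (fun y => y == x)
    let rest := (x :: xs).dropWhile (fun y => y == x)
    (if run.length == 6 then (if x == 1 then (8000 : Int) else x * 800) else 0) + grpRuns rest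
termination_by l.length
decreasing_by
  simp only [List.dropWhile_cons, BEq.rfl, if_pos]
  exact Nat.lt_succ_of_le (List.length_dropWhile_le _ xs)

def ScoreSixKind_alt (dice : List Int) : Int :=
  grpRuns (PySem.List.sorted dice (fun x => x) false)

-- ===== PRECONDITION & SPEC =====
def Spec_ScoreSixKind (dice : List Int) (out : Int) : Prop := out = ScoreSixKind_alt dice
instance (dice : List Int) (out : Int) : Decidable (Spec_ScoreSixKind dice out) := by unfold Spec_ScoreSixKind; infer_instance

-- ===== CLAIM (what is proved, stated in full; the proofs are below) =====
def Claim_equal_ScoreSixKind : Prop := ∀ (dice : List Int), Dom_ScoreSixKind dice → Spec_ScoreSixKind dice (ScoreSixKind dice)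

-- ===== LEMMAS AND PROOFS =====

-- per-face contribution, as a function of the face's multiplicity in the whole list
def faceScore (cnt : Nat) (k : Int) : Int :=
  if cnt == 6 then (if k == 1 then (8000 : Int) else k * 800) else 0

-- A's dict-building step equals the counter step, for every dict state
lemma stepA_eq (d : PySem.Dict Int Int) (x : Int) :
    (let d' := if d.contains x then d else d.insert x 0
     d'.insert x (d'.getD x 0 + 1)) = d.insert x (d.getD x 0 + 1) := by
  by_cases h : d.contains x
  · simp [h]
  · simp only [h, if_neg, Bool.false_eq_true, not_false_iff]
    rw [PySem.Dict.getD_insert_self, PySem.Dict.insert_insert_self,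
        PySem.Dict.getD_of_not_contains d 0 (by simpa using h)]

lemma dieMap_eq_counter (dice : List Int) :
    dice.foldl (fun d x =>
      let d := if d.contains x then d else d.insert x 0
      d.insert x (d.getD x 0 + 1)) PySem.Dict.empty = PySem.Dict.counter dice := by
  rw [← PySem.Dict.foldl_insert_getD_add_one_eq_counter]
  exact PySem.List.foldl_congr_mem _ _ _ _ (fun d x _ => stepA_eq d x)

lemma scoreA_eq_sum (dice : List Int) :
    ScoreSixKind dice =
      ((PySem.Set.ofList dice).map (fun k => faceScore (dice.count k) k)).sum := by
  have h0 : ScoreSixKind dice =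
      ((PySem.Dict.counter dice).keys.foldl (fun acc k => acc ++ [k]) ([] : List Int)).foldl
        (fun score k =>
          if (PySem.Dict.counter dice).getD k 0 == 6 then
            (if k == 1 then score + 8000 else score + k * 800)
          else score) 0 := by
    simp only [ScoreSixKind, MapDieFaces, dieMap_eq_counter]
  rw [h0, PySem.List.foldl_append_singleton, List.nil_append, PySem.Dict.keys_counter]
  have hstep : ∀ (s : Int), ∀ k ∈ PySem.Set.ofList dice,
      (if (PySem.Dict.counter dice).getD k 0 == 6 then
        (if k == 1 then s + 8000 else s + k * 800) else s)
      = s + faceScore (dice.count k) k := by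
    intro s k _
    rw [PySem.Dict.getD_counter]
    unfold faceScore
    have hb : (((dice.count k : Int)) == (6 : Int)) = ((dice.count k) == 6) := by
      simp
      omega
    rw [hb]
    by_cases h6 : dice.count k == 6 <;> by_cases h1 : k == (1 : Int) <;> simp [h6, h1]
  rw [PySem.List.foldl_congr_mem _ _ _ _ hstep, PySem.List.foldl_add]
  simp

-- x is absent from the dropWhile(==x) suffix of a sorted list whose elements all dominate x
lemma not_mem_dropWhile_of_sorted (l : List Int) (x : Int)
    (hs : l.Pairwise (· ≤ ·)) (hx : ∀ y ∈ l, x ≤ y) :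
    x ∉ l.dropWhile (fun y => y == x) := by
  induction l with
  | nil => simp
  | cons y t ih =>
    by_cases hy : y = x
    · subst hy
      simp only [List.dropWhile_cons, BEq.rfl, if_pos]
      exact ih hs.of_cons (fun z hz => hx z (List.mem_cons_of_mem _ hz))
    · have hyx : (y == x) = false := by simpa using hy
      simp only [List.dropWhile_cons, hyx, Bool.false_eq_true, if_false]
      intro hmem
      rcases List.mem_cons.mp hmem with h | h
      · exact hy h.symm
      · have h1 : x ≤ y := hx y (List.mem_cons_self)
        have h2 : y ≤ x := (List.pairwise_cons.mp hs).1 x h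
        exact hy (le_antisymm h2 h1)

-- grpRuns of a sorted list is the sum of faceScore over some nodup list of its faces
lemma grpRuns_spec : ∀ (n : Nat) (l : List Int), l.length ≤ n → l.Pairwise (· ≤ ·) →
    ∃ ks : List Int, ks.Nodup ∧ (∀ a, a ∈ ks ↔ a ∈ l) ∧
      grpRuns l = (ks.map (fun k => faceScore (l.count k) k)).sum := by
  intro n
  induction n with
  | zero =>
    intro l hl _
    have : l = [] := List.eq_nil_of_length_eq_zero (Nat.le_zero.mp hl)
    subst this
    exact ⟨[], by simp, by simp, by simp [grpRuns]⟩
  | succ n ih =>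
    intro l hl hs
    match l with
    | [] => exact ⟨[], by simp, by simp, by simp [grpRuns]⟩
    | x :: xs =>
      set run := (x :: xs).takeWhile (fun y => y == x) with hrun
      set rest := (x :: xs).dropWhile (fun y => y == x) with hrest
      have hsplit : run ++ rest = x :: xs := List.takeWhile_append_dropWhile
      have hrunx : ∀ y ∈ run, y = x := fun y hy => by
        simpa using List.mem_takeWhile_imp hy
      have hle : ∀ y ∈ x :: xs, x ≤ y := by
        intro y hy
        rcases List.mem_cons.mp hy with h | h
        · exact h ▸ le_refl x
        · exact (List.pairwise_cons.mp hs).1 y h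
      have hxrest : x ∉ rest := not_mem_dropWhile_of_sorted (x :: xs) x hs hle
      have hrests : rest.Pairwise (· ≤ ·) := hs.sublist (List.dropWhile_sublist _)
      have hrestlen : rest.length ≤ n := by
        have : rest = xs.dropWhile (fun y => y == x) := by
          simp [hrest]
        rw [this]
        exact Nat.le_trans (List.length_dropWhile_le _ xs) (Nat.le_of_succ_le_succ hl)
      obtain ⟨ks', hnd, hmem, hsum⟩ := ih rest hrestlen hrests
      refine ⟨x :: ks', ?_, ?_, ?_⟩
      · exact List.nodup_cons.mpr ⟨fun h => hxrest ((hmem x).mp h), hnd⟩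
      · intro a
        have hxrun : x ∈ run := by
          rw [hrun]
          simp
        constructor
        · intro h
          rcases List.mem_cons.mp h with h | h
          · rw [← hsplit]
            exact List.mem_append_left _ (h ▸ hxrun)
          · rw [← hsplit]
            exact List.mem_append_right _ ((hmem a).mp h)
        · intro h
          rw [← hsplit] at h
          rcases List.mem_append.mp h with h | h
          · exact List.mem_cons.mpr (Or.inl (hrunx a h))
          · exact List.mem_cons.mpr (Or.inr ((hmem a).mpr h))
      · have hcountx : (x :: xs).count x = run.length := by
          rw [← hsplit, List.count_append]
          have h1 : run.count x = run.length :=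
            List.count_eq_length.mpr (fun b hb => (hrunx b hb).symm)
          have h2 : rest.count x = 0 := List.count_eq_zero.mpr hxrest
          omega
        have hcountk : ∀ k ∈ ks', (x :: xs).count k = rest.count k := by
          intro k hk
          have hkrest : k ∈ rest := (hmem k).mp hk
          have hkx : k ≠ x := fun h => hxrest (h ▸ hkrest)
          rw [← hsplit, List.count_append]
          have : run.count k = 0 := List.count_eq_zero.mpr (fun h => hkx (hrunx k h))
          omega
        have hgrp : grpRuns (x :: xs) =
            (if run.length == 6 then (if x == 1 then (8000 : Int) else x * 800) else 0) + grpRuns rest := by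
          rw [grpRuns]
        rw [hgrp, hsum]
        simp only [List.map_cons, List.sum_cons]
        congr 1
        · unfold faceScore
          rw [hcountx]
        · exact congrArg List.sum (List.map_congr_left (fun k hk => by rw [hcountk k hk]))

lemma scoreB_eq_sum (dice : List Int) :
    ∃ ks : List Int, ks.Nodup ∧ (∀ a, a ∈ ks ↔ a ∈ dice) ∧
      ScoreSixKind_alt dice = (ks.map (fun k => faceScore (dice.count k) k)).sum := by
  unfold ScoreSixKind_alt
  set s := PySem.List.sorted dice (fun x => x) false with hsdef
  have hperm : s.Perm dice := PySem.List.sorted_perm dice _ false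
  have hpw : s.Pairwise (· ≤ ·) := by
    simpa using PySem.List.sorted_pairwise (xs := dice) (key := fun x => x)
  obtain ⟨ks, hnd, hmem, hsum⟩ := grpRuns_spec s.length s (le_refl _) hpw
  refine ⟨ks, hnd, fun a => (hmem a).trans hperm.mem_iff, ?_⟩
  rw [hsum]
  exact congrArg List.sum (List.map_congr_left (fun k _ => by rw [hperm.count_eq]))

-- ===== VERDICT (by name: the statement is the Claim_ definition above) =====
theorem ScoreSixKind_spec : Claim_equal_ScoreSixKind := by
  intro dice _
  unfold Spec_ScoreSixKind
  obtain ⟨ks, hnd, hmem, hB⟩ := scoreB_eq_sum dice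
  rw [scoreA_eq_sum, hB]
  have hperm : (PySem.Set.ofList dice).Perm ks := by
    refine (List.perm_ext_iff_of_nodup (PySem.Set.nodup_ofList dice) hnd).mpr ?_
    intro a
    rw [PySem.Set.mem_ofList, hmem]
  exact (hperm.map _).sum_eq
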